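-- pv_equiv track=rewrite | github.com/shridhar107/python_challenges | counting_valleys.py | find_how_many_neg_in_array
-- ===== SOURCE A (Python) =====
-- def find_how_many_neg_in_array(ar):
--     count = 0
--     u_set = 0
--     for i in ar:
--         if i*(-1) > 0:
--             if u_set == 0:
--                 count += 1
--                 u_set = 1
--         else:
--             u_set = 0
--     return count
-- ===== SOURCE B (Python) =====
-- def find_how_many_neg_in_array(ar):
--     # Count maximal negative runs: locate each run's first element,
--     # then consume the whole run with an inner loop before resuming.
--     count = 0
--     i, n = 0, len(ar)
--     while i < n:
--         if ar[i] < 0: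
--             count += 1
--             while i < n and ar[i] < 0:
--                 i += 1
--         else:
--             i += 1
--     return count
-- ===== Notes on version B (the rewrite author's own statement) =====
-- stated objective: alternative
-- what changed: Replaces the boolean-flag state machine with a run-skipping two-level loop: the outer loop finds the first element of each negative run and the inner loop consumes the rest of that run, so no per-element flag is maintained.
import Mathlib
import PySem

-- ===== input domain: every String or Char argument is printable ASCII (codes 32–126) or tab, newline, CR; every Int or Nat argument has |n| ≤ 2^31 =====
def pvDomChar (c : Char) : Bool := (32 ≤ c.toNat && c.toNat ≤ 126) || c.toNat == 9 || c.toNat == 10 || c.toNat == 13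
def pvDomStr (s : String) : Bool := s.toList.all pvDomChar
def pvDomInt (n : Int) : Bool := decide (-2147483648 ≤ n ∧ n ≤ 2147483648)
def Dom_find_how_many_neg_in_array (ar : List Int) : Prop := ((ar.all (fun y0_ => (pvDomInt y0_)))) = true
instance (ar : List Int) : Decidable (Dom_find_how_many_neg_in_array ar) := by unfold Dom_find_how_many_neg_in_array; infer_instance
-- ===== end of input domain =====

-- B replaces A's boolean-flag state machine by a run-skipping loop: find each
-- negative run's first element, then consume the whole run; objective: alternative.

-- ===== PORT A =====
def find_how_many_neg_in_array (ar : List Int) : Int :=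
  (ar.foldl
    (fun (s : Int × Int) i =>
      if i * (-1) > 0 then
        (if s.2 = 0 then (s.1 + 1, 1) else s)
      else (s.1, 0))
    (0, 0)).1

-- ===== PORT B =====
-- B's outer loop: at a run start, count 1 and consume the whole run
-- (the inner `while ar[i] < 0` loop = dropWhile), else move one step.
def find_how_many_neg_in_array_alt (ar : List Int) : Int :=
  match ar with
  | [] => 0
  | x :: xs =>
    if x < 0 then 1 + find_how_many_neg_in_array_alt (xs.dropWhile (fun y => decide (y < 0)))
    else find_how_many_neg_in_array_alt xs
termination_by ar.length
decreasing_by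
· exact Nat.lt_succ_of_le (List.length_dropWhile_le _ _)
· exact Nat.lt_succ_self _

-- ===== PRECONDITION & SPEC =====
def Spec_find_how_many_neg_in_array (ar : List Int) (out : Int) : Prop := out = find_how_many_neg_in_array_alt ar
instance (ar : List Int) (out : Int) : Decidable (Spec_find_how_many_neg_in_array ar out) := by unfold Spec_find_how_many_neg_in_array; infer_instance

-- ===== CLAIM (what is proved, stated in full; the proofs are below) =====
def Claim_equal_find_how_many_neg_in_array : Prop := ∀ (ar : List Int), Dom_find_how_many_neg_in_array ar → Spec_find_how_many_neg_in_array ar (find_how_many_neg_in_array ar)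

-- ===== LEMMAS AND PROOFS =====
-- loop invariant for A's fold, for both flag states, proved together:
-- from flag 0 the fold adds B's count of the remaining list; from flag 1
-- (inside a run) it adds B's count of the list with the current run removed.
lemma pv_fold_inv (ar : List Int) (c : Int) :
    ((ar.foldl
      (fun (s : Int × Int) i =>
        if i * (-1) > 0 then
          (if s.2 = 0 then (s.1 + 1, 1) else s)
        else (s.1, 0))
      (c, 0)).1 = c + find_how_many_neg_in_array_alt ar)
    ∧ ((ar.foldl
      (fun (s : Int × Int) i =>
        if i * (-1) > 0 then
          (if s.2 = 0 then (s.1 + 1, 1) else s)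
        else (s.1, 0))
      (c, 1)).1 = c + find_how_many_neg_in_array_alt (ar.dropWhile (fun y => decide (y < 0)))) := by
  induction ar generalizing c with
  | nil => simp [find_how_many_neg_in_array_alt]
  | cons x xs ih =>
    have hx : (x * (-1) > 0) ↔ (x < 0) := by omega
    constructor
    · rw [List.foldl_cons]
      by_cases h : x < 0
      · rw [if_pos (hx.mpr h), if_pos rfl]
        rw [find_how_many_neg_in_array_alt, if_pos h]
        have := (ih (c + 1)).2
        rw [this]; ring
      · rw [if_neg (fun h' => h (hx.mp h'))]
        rw [find_how_many_neg_in_array_alt, if_neg h]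
        exact (ih c).1
    · rw [List.foldl_cons]
      by_cases h : x < 0
      · rw [if_pos (hx.mpr h), if_neg (by norm_num : ¬ (1:Int) = 0)]
        rw [List.dropWhile_cons_of_pos (by simpa using h)]
        exact (ih c).2
      · rw [if_neg (fun h' => h (hx.mp h'))]
        rw [List.dropWhile_cons_of_neg (by simpa using h)]
        rw [find_how_many_neg_in_array_alt, if_neg h]
        exact (ih c).1

-- ===== VERDICT (by name: the statement is the Claim_ definition above) =====
theorem find_how_many_neg_in_array_spec : Claim_equal_find_how_many_neg_in_array := by
  intro ar _
  unfold Spec_find_how_many_neg_in_array find_how_many_neg_in_array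
  have := (pv_fold_inv ar 0).1
  simpa using this
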